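-- pv_equiv track=rewrite | github.com/xianxiaoyin/scripts | excelFormat.py | twoList
-- ===== SOURCE A (Python) =====
-- def twoList(tlist, dict):
--     tmpList = []
--     tmp1 = [i.split("|") for i in tlist]
--     for i in tmp1:
--         for j in i:
--           if j:
--             tmpList.append(dict[j])
--     return "|".join(tmpList)
-- ===== SOURCE B (Python) =====
-- def twoList(tlist, dict):
--     # Single-pass character state machine: no split() and no join(); walk every
--     # character, accumulate the current token, and flush it through dict straight
--     # into the result string at each '|' (a sentinel '|' ends each element).
--     res = ""
--     first = True
--     cur = []
--     for s in tlist: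
--         for ch in s + "|":
--             if ch == "|":
--                 if cur:
--                     res += ("" if first else "|") + dict["".join(cur)]
--                     first = False
--                     cur = []
--             else:
--                 cur.append(ch)
--     return res
-- ===== Notes on version B (the rewrite author's own statement) =====
-- stated objective: alternative
-- what changed: B replaces A's split-into-nested-lists / append-to-list / final join pipeline with a single-pass character-level state machine: it never calls split or join, instead scanning every character once, accumulating the current token and flushing it through dict directly into the result string at each '|' boundary (a sentinel '|' ends each element); Pre_ excludes inputs where some nonempty token is missing from dict, on which both A and B raise KeyError.
import Mathlib
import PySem

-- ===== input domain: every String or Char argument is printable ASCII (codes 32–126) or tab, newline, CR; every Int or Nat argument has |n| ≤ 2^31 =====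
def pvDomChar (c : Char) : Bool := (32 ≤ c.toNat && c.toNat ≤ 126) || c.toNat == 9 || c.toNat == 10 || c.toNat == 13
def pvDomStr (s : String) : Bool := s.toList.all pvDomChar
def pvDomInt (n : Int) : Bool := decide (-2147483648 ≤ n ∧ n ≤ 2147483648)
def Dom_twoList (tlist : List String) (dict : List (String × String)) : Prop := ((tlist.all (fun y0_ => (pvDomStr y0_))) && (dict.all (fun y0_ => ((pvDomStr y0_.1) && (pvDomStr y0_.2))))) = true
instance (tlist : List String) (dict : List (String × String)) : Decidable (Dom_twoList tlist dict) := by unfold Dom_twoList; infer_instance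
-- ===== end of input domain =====

-- B is a single-pass character-level state machine (no split, no join): it scans every
-- character once and flushes each accumulated token through dict straight into the result
-- string at each '|' boundary (objective: alternative algorithm, same cost).

-- ===== PORT A =====
-- dict[j] raises KeyError when j is absent; Pre_ excludes that, so the port uses getD "".
def twoList (tlist : List String) (dict : List (String × String)) : String :=
  let tmp1 := tlist.map (fun i => (PySem.Str.split? i "|").getD [])
  let tmpList := tmp1.foldl (fun acc i =>
    i.foldl (fun acc2 j =>
      if j ≠ "" then acc2 ++ [PySem.Dict.getD (PySem.Dict.mk dict) j ""] else acc2) acc) []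
  PySem.Str.join "|" tmpList

-- ===== PORT B =====
-- 'for ch in s + "|"' iterates the characters of s followed by the sentinel '|';
-- exact as s.toList ++ ['|'].  dict["".join(cur)] under Pre_ is getD … "".
def twoList_alt (tlist : List String) (dict : List (String × String)) : String :=
  (tlist.foldl (fun (st : String × Bool × List Char) s =>
    (s.toList ++ ['|']).foldl (fun (st : String × Bool × List Char) ch =>
      if ch = '|' then
        if st.2.2 ≠ [] then
          (st.1 ++ (if st.2.1 then "" else "|")
             ++ PySem.Dict.getD (PySem.Dict.mk dict) (String.ofList st.2.2) "", false, ([] : List Char))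
        else st
      else (st.1, st.2.1, st.2.2 ++ [ch])) st) ("", true, ([] : List Char))).1

-- ===== PRECONDITION & SPEC =====
-- Pre_ excludes exactly the inputs having a nonempty '|'-token not present as a key of dict,
-- on which A (and B alike) raises KeyError.
def Pre_twoList (tlist : List String) (dict : List (String × String)) : Prop :=
  ∀ s ∈ tlist, ∀ t ∈ (PySem.Str.split? s "|").getD [], t ≠ "" →
    (PySem.Dict.mk dict).contains t = true

instance (tlist : List String) (dict : List (String × String)) : Decidable (Pre_twoList tlist dict) := by
  unfold Pre_twoList; infer_instance

def pvWitness_twoList : List String × (List (String × String)) :=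
  (["a|b", "", "b"], [("a", "x"), ("b", "y")])

def Spec_twoList (tlist : List String) (dict : List (String × String)) (out : String) : Prop := out = twoList_alt tlist dict
instance (tlist : List String) (dict : List (String × String)) (out : String) : Decidable (Spec_twoList tlist dict out) := by unfold Spec_twoList; infer_instance

-- ===== CLAIM (what is proved, stated in full; the proofs are below) =====
def Claim_equal_twoList : Prop := ∀ (tlist : List String) (dict : List (String × String)), Dom_twoList tlist dict → Pre_twoList tlist dict → Spec_twoList tlist dict (twoList tlist dict)

-- ===== LEMMAS AND PROOFS =====

-- prepend p onto the first block (creating it if none)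
def consH (p : List Char) : List (List Char) → List (List Char)
  | [] => [p]
  | h :: t => (p ++ h) :: t

-- simple structural recursion computing split on the single separator '|'
def pvSplit : List Char → List (List Char)
  | [] => [[]]
  | c :: rest => if c = '|' then [] :: pvSplit rest else consH [c] (pvSplit rest)

lemma pvSplit_ne_nil (cs : List Char) : pvSplit cs ≠ [] := by
  cases cs with
  | nil => simp [pvSplit]
  | cons c r =>
    simp only [pvSplit]
    split
    · simp
    · cases h : pvSplit r <;> simp [consH]

lemma consH_nil_of_ne {x : List (List Char)} (h : x ≠ []) : consH [] x = x := by
  cases x with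
  | nil => exact absurd rfl h
  | cons a t => simp [consH]

lemma consH_consH (a b : List Char) (x : List (List Char)) :
    consH a (consH b x) = consH (a ++ b) x := by
  cases x <;> simp [consH]

lemma go_eq (fuel : Nat) : ∀ (l cur : List Char) (acc : List (List Char)), l.length < fuel →
    PySem.Chars.splitOn.go ['|'] fuel l cur acc = acc.reverse ++ consH cur.reverse (pvSplit l) := by
  induction fuel with
  | zero => intro l cur acc h; omega
  | succ n ih =>
    intro l cur acc h
    cases l with
    | nil => simp [PySem.Chars.splitOn.go, pvSplit, consH]
    | cons c rest =>
      by_cases hc : c = '|'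
      · subst hc
        have hpre : List.isPrefixOf ['|'] ('|' :: rest) = true := by simp [List.isPrefixOf]
        simp only [PySem.Chars.splitOn.go, hpre, if_pos]
        simp only [List.length_cons, List.length_nil, List.drop_succ_cons, List.drop_zero]
        rw [ih rest [] (cur.reverse :: acc) (Nat.lt_of_succ_lt_succ (by simpa using h))]
        simp only [List.reverse_nil]
        rw [consH_nil_of_ne (pvSplit_ne_nil rest)]
        simp [pvSplit, consH]
      · have hpre : List.isPrefixOf ['|'] (c :: rest) = false := by
          simp [List.isPrefixOf]
          exact fun hh => (hc hh.symm).elim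
        simp only [PySem.Chars.splitOn.go, hpre, Bool.false_eq_true, if_false]
        rw [ih rest (c :: cur) acc (Nat.lt_of_succ_lt_succ (by simpa using h))]
        simp only [pvSplit, if_neg hc]
        rw [consH_consH]
        simp

lemma splitOn_eq_pvSplit (cs : List Char) : PySem.Chars.splitOn cs ['|'] = pvSplit cs := by
  unfold PySem.Chars.splitOn
  rw [go_eq (cs.length + 1) cs [] [] (by omega)]
  simp [consH_nil_of_ne (pvSplit_ne_nil cs)]

lemma splitS_eq (s : String) :
    (PySem.Str.split? s "|").getD [] = (pvSplit s.toList).map String.ofList := by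
  have hsep : ("|" : String).toList = ['|'] := by decide
  simp [PySem.Str.split?, PySem.Chars.split?, hsep, splitOn_eq_pvSplit]

lemma filter_flatMap' {α β : Type} (p : β → Bool) (g : α → List β) (xs : List α) :
    (xs.flatMap g).filter p = xs.flatMap (fun x => (g x).filter p) := by
  induction xs with
  | nil => simp
  | cons h t ih => simp [List.flatMap_cons, List.filter_append, ih]

lemma filter_map_ofList (xs : List (List Char)) :
    ((xs.map String.ofList).filter (fun t => t ≠ "")) =
      (xs.filter (fun cs => cs ≠ [])).map String.ofList := by
  induction xs with
  | nil => simp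
  | cons h t ih =>
    simp only [List.map_cons, List.filter_cons, ne_eq, decide_not]
    simp only [ne_eq, decide_not] at ih
    by_cases hh : h = []
    · subst hh
      have h0 : (String.ofList ([] : List Char)) = "" := rfl
      simp [h0, ih]
    · have hne : String.ofList h ≠ "" := by
        intro e
        apply hh
        have := congrArg String.toList e
        simpa using this
      simp [hh, hne, ih]

lemma inner_foldl (f : String → String) (i : List String) : ∀ acc : List String,
    i.foldl (fun acc2 j => if j ≠ "" then acc2 ++ [f j] else acc2) acc
      = acc ++ (i.filter (fun j => j ≠ "")).map f := by
  induction i with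
  | nil => intro acc; simp
  | cons j t ih =>
    intro acc
    rw [List.foldl_cons]
    by_cases hj : j = ""
    · rw [if_neg (fun hcon => hcon hj), ih]
      simp [hj]
    · rw [if_pos hj, ih]
      simp [hj]

lemma outer_foldl (f : String → String) (ls : List (List String)) : ∀ acc : List String,
    ls.foldl (fun acc i =>
        i.foldl (fun acc2 j => if j ≠ "" then acc2 ++ [f j] else acc2) acc) acc
      = acc ++ ls.flatMap (fun i => (i.filter (fun j => j ≠ "")).map f) := by
  induction ls with
  | nil => intro acc; simp
  | cons i ls' ih =>
    intro acc
    rw [List.foldl_cons, inner_foldl, ih]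
    simp

-- ===== B-side lemmas: the character state machine =====

-- one machine step (definitionally the inner lambda of twoList_alt with lookup fd)
def stepC (fd : List Char → String) (st : String × Bool × List Char) (ch : Char) :
    String × Bool × List Char :=
  if ch = '|' then
    if st.2.2 ≠ [] then
      (st.1 ++ (if st.2.1 then "" else "|") ++ fd st.2.2, false, ([] : List Char))
    else st
  else (st.1, st.2.1, st.2.2 ++ [ch])

-- emitting one raw token (possibly empty) into the (result, first) pair
def stepP (fd : List Char → String) (p : String × Bool) (t : List Char) : String × Bool :=
  if t ≠ [] then (p.1 ++ (if p.2 then "" else "|") ++ fd t, false) else p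

-- emitting one already-mapped word
def stepJ (p : String × Bool) (w : String) : String × Bool :=
  (p.1 ++ (if p.2 then "" else "|") ++ w, false)

def barjoin : List String → String
  | [] => ""
  | w :: t => "|" ++ w ++ barjoin t

lemma toList_inj {a b : String} (h : a.toList = b.toList) : a = b := by
  have := congrArg String.ofList h
  simpa using this

lemma stepC_bar (fd : List Char → String) (res : String) (first : Bool) (cur : List Char) :
    stepC fd (res, first, cur) '|'
      = ((stepP fd (res, first) cur).1, (stepP fd (res, first) cur).2, ([] : List Char)) := by
  by_cases h : cur = []
  · subst h; simp [stepC, stepP]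
  · simp [stepC, stepP, h]

-- scanning cs plus the sentinel '|' consumes exactly the tokens consH cur (pvSplit cs)
lemma scan (fd : List Char → String) (cs : List Char) :
    ∀ (res : String) (first : Bool) (cur : List Char),
    (cs ++ ['|']).foldl (stepC fd) (res, first, cur)
      = (((consH cur (pvSplit cs)).foldl (stepP fd) (res, first)).1,
         ((consH cur (pvSplit cs)).foldl (stepP fd) (res, first)).2, ([] : List Char)) := by
  induction cs with
  | nil =>
    intro res first cur
    simp only [List.nil_append, List.foldl_cons, List.foldl_nil, pvSplit, consH,
      List.append_nil]
    exact stepC_bar fd res first cur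
  | cons c cs' ih =>
    intro res first cur
    by_cases hch : c = '|'
    · subst hch
      have hps : pvSplit ('|' :: cs') = [] :: pvSplit cs' := by simp [pvSplit]
      have hc : consH cur ([] :: pvSplit cs') = cur :: pvSplit cs' := by simp [consH]
      simp only [List.cons_append, List.foldl_cons, stepC_bar]
      rw [ih, consH_nil_of_ne (pvSplit_ne_nil cs'), hps, hc, List.foldl_cons]
    · simp only [List.cons_append, List.foldl_cons]
      have h1 : stepC fd (res, first, cur) c = (res, first, cur ++ [c]) := by
        simp [stepC, hch]
      rw [h1, ih]
      simp only [pvSplit, if_neg hch, consH_consH]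

-- the whole machine over tlist consumes the flattened token stream
lemma outerB (fd : List Char → String) (tl : List String) :
    ∀ (res : String) (first : Bool),
    tl.foldl (fun st s => (s.toList ++ ['|']).foldl (stepC fd) st) (res, first, ([] : List Char))
      = (((tl.flatMap (fun s => pvSplit s.toList)).foldl (stepP fd) (res, first)).1,
         ((tl.flatMap (fun s => pvSplit s.toList)).foldl (stepP fd) (res, first)).2,
         ([] : List Char)) := by
  induction tl with
  | nil => intro res first; simp
  | cons s t ih =>
    intro res first
    rw [List.foldl_cons, scan fd s.toList res first [], consH_nil_of_ne (pvSplit_ne_nil _),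
      ih, List.flatMap_cons, List.foldl_append]

-- empty tokens are skipped, nonempty ones are mapped by fd
lemma MtoJ (fd : List Char → String) (toks : List (List Char)) : ∀ p : String × Bool,
    toks.foldl (stepP fd) p
      = ((toks.filter (fun t => t ≠ [])).map fd).foldl stepJ p := by
  induction toks with
  | nil => intro p; simp
  | cons t ts ih =>
    intro p
    by_cases h : t = []
    · subst h; simp [stepP, ih]
    · simp only [List.filter_cons, List.foldl_cons]
      have h1 : stepP fd p t = stepJ p (fd t) := by simp [stepP, stepJ, h]
      simp [h, h1, ih]

lemma foldJ_false (ws : List String) : ∀ r : String,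
    ws.foldl stepJ (r, false) = (r ++ barjoin ws, false) := by
  induction ws with
  | nil =>
    intro r
    have h : r ++ barjoin [] = r := toList_inj (by simp [barjoin])
    simp [h]
  | cons w t ih =>
    intro r
    simp only [List.foldl_cons, stepJ, if_neg (by simp : ¬ (false = true))]
    rw [ih]
    have h : r ++ "|" ++ w ++ barjoin t = r ++ barjoin (w :: t) :=
      toList_inj (by simp [barjoin])
    rw [h]

lemma joinChars (ws : List String) : ∀ w : String,
    PySem.Chars.join ['|'] (w.toList :: ws.map String.toList)
      = w.toList ++ (barjoin ws).toList := by
  induction ws with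
  | nil => intro w; simp [PySem.Chars.join_singleton, barjoin]
  | cons v t ih =>
    intro w
    simp only [List.map_cons]
    rw [PySem.Chars.join_cons_cons, ih v]
    simp [barjoin]

lemma foldJ_eq_join (ws : List String) :
    (ws.foldl stepJ ("", true)).1 = PySem.Str.join "|" ws := by
  cases ws with
  | nil =>
    apply toList_inj
    simp [PySem.Str.toList_join, PySem.Chars.join_nil]
  | cons w t =>
    simp only [List.foldl_cons, stepJ]
    rw [foldJ_false]
    apply toList_inj
    have hsep : ("|" : String).toList = ['|'] := by decide
    simp [PySem.Str.toList_join, hsep, joinChars]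

lemma main_eq (tlist : List String) (dict : List (String × String)) :
    twoList tlist dict = twoList_alt tlist dict := by
  have hfd :
      twoList_alt tlist dict
        = (tlist.foldl (fun st s => (s.toList ++ ['|']).foldl
            (stepC (fun cs => PySem.Dict.getD (PySem.Dict.mk dict) (String.ofList cs) "")) st)
            ("", true, ([] : List Char))).1 := rfl
  have hA : twoList tlist dict = PySem.Str.join "|"
      ((tlist.map (fun i => (PySem.Str.split? i "|").getD [])).foldl
        (fun acc i => i.foldl (fun acc2 j =>
          if j ≠ "" then acc2 ++ [PySem.Dict.getD (PySem.Dict.mk dict) j ""] else acc2) acc) []) := rfl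
  rw [hA, outer_foldl, List.nil_append, List.flatMap_map, hfd, outerB]
  simp only [MtoJ, foldJ_eq_join]
  apply congrArg
  rw [filter_flatMap', List.map_flatMap]
  simp only [splitS_eq, filter_map_ofList, List.map_map]
  simp [Function.comp_def]

-- ===== VERDICT (by name: the statement is the Claim_ definition above) =====
theorem twoList_spec : Claim_equal_twoList := by
  intro tlist dict _ _
  unfold Spec_twoList
  exact main_eq tlist dict
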